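-- pv_equiv track=rewrite | github.com/frastlin/Hero | game_old/actions.py | sorter
-- ===== SOURCE A (Python) =====
-- def sorter(l):
-- 	q = []
-- 	for m in l:
-- 		if m in ("take", "drop", "use", "useWith", "wear", "hold"):
-- 			pass
-- 		elif m in q:
-- 			return m
-- 		else:
-- 			q.append(m)
-- ===== SOURCE B (Python) =====
-- _KEYWORDS = ("take", "drop", "use", "useWith", "wear", "hold")
--
-- def sorter(l):
--     # index table: value -> index of its SECOND occurrence (keywords skipped,
--     # third and later occurrences ignored), then argmin over that index.
--     second = {}
--     seen = set()
--     for i, m in enumerate(l):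
--         if m in _KEYWORDS:
--             continue
--         if m in seen:
--             if m not in second:
--                 second[m] = i
--         else:
--             seen.add(m)
--     if second:
--         return min(second.items(), key=lambda kv: kv[1])[0]
--     return None
-- ===== Notes on version B (the rewrite author's own statement) =====
-- stated objective: alternative
-- what changed: A scans a growing seen-list and returns at the first repeat; B makes one full pass building a second-occurrence index table (keywords skipped, third+ occurrences ignored) and then returns the key with the minimal recorded index via argmin.
import Mathlib
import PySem

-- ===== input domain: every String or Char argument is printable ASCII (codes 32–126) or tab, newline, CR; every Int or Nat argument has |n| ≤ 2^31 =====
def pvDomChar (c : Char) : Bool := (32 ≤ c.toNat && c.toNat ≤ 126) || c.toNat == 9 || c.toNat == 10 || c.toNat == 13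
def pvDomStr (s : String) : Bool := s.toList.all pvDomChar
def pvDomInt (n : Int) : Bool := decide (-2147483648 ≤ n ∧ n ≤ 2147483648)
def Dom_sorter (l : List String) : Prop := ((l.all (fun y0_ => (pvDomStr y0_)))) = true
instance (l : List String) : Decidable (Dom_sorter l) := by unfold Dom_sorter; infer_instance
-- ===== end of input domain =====

-- B replaces A's incremental seen-membership scan-and-return with one pass building a
-- second-occurrence index table followed by an argmin selection (objective: alternative).

-- ===== PORT A =====
def sorterKw : List String := ["take", "drop", "use", "useWith", "wear", "hold"]

def sorterGo : List String → List String → Option String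
  | [], _ => none
  | m :: rest, q =>
    if m ∈ sorterKw then sorterGo rest q
    else if m ∈ q then some m
    else sorterGo rest (q ++ [m])

def sorter (l : List String) : Option String := sorterGo l []

-- ===== PORT B =====
def sorterAltKw : List String := ["take", "drop", "use", "useWith", "wear", "hold"]

-- one loop step of Source B: the dict 'second' is ported by hand as an association list in
-- insertion order ('m not in second' = no key m yet, 'second[m] = i' = append; exact
-- because Source B never overwrites), 'seen' is a Python set.
def sorterAltStep (st : List (String × Int) × PySem.Set String) (p : Int × String) :
    List (String × Int) × PySem.Set String :=
  if p.2 ∈ sorterAltKw then st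
  else if PySem.Set.contains st.2 p.2 then
    (if st.1.any (fun kv => kv.1 == p.2) then st.1 else st.1 ++ [(p.2, p.1)], st.2)
  else (st.1, PySem.Set.add st.2 p.2)

def sorter_alt (l : List String) : Option String :=
  match PySem.List.min?
      ((PySem.List.enumerate l 0).foldl sorterAltStep ([], PySem.Set.ofList [])).1
      (fun kv => kv.2) with
  | some kv => some kv.1
  | none => none

-- ===== PRECONDITION & SPEC =====
def Spec_sorter (l : List String) (out : Option String) : Prop := out = sorter_alt l
instance (l : List String) (out : Option String) : Decidable (Spec_sorter l out) := by unfold Spec_sorter; infer_instance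

-- ===== CLAIM (what is proved, stated in full; the proofs are below) =====
def Claim_equal_sorter : Prop := ∀ (l : List String), Dom_sorter l → Spec_sorter l (sorter l)

-- ===== LEMMAS AND PROOFS =====

-- once the 'second' table is nonempty its head never changes
lemma fold_head_stable (pl : List (Int × String)) :
    ∀ (a : String × Int) (rest : List (String × Int)) (seen : PySem.Set String),
    (pl.foldl sorterAltStep (a :: rest, seen)).1.head? = some a := by
  induction pl with
  | nil => intro a rest seen; simp
  | cons p t ih =>
    intro a rest seen
    simp only [List.foldl_cons, sorterAltStep]
    split_ifs with h1 h2 h3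
    · exact ih a rest seen
    · exact ih a rest seen
    · simpa using ih a (rest ++ [(p.2, p.1)]) seen
    · exact ih a rest (PySem.Set.add seen p.2)

-- A's loop from state q equals the head of the table B's fold builds, when q and seen agree
lemma go_eq_fold (l : List String) :
    ∀ (i : Int) (q : List String) (seen : PySem.Set String),
    (∀ m, m ∈ q ↔ m ∈ seen) →
    sorterGo l q =
      (((PySem.List.enumerate l i).foldl sorterAltStep ([], seen)).1.head?).map Prod.fst := by
  induction l with
  | nil => intro i q seen _; simp [sorterGo, PySem.List.enumerate]
  | cons m rest ih =>
    intro i q seen hq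
    rw [PySem.List.enumerate_cons]
    simp only [List.foldl_cons, sorterGo, sorterAltStep]
    by_cases hk : m ∈ sorterKw
    · have hk' : m ∈ sorterAltKw := hk
      simp only [if_pos hk, if_pos hk']
      exact ih (i + 1) q seen hq
    · have hk' : m ∉ sorterAltKw := hk
      simp only [if_neg hk, if_neg hk']
      by_cases hm : m ∈ q
      · have hs : PySem.Set.contains seen m = true := by
          rw [PySem.Set.contains_iff]; exact (hq m).1 hm
        simp only [if_pos hm, if_pos hs, List.any_nil, Bool.false_eq_true, if_false,
          List.nil_append]
        rw [fold_head_stable]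
        rfl
      · have hs : ¬ PySem.Set.contains seen m = true := by
          rw [PySem.Set.contains_iff]; exact fun h => hm ((hq m).2 h)
        simp only [if_neg hm, if_neg hs]
        refine ih (i + 1) (q ++ [m]) (PySem.Set.add seen m) ?_
        intro x
        rw [List.mem_append, List.mem_singleton, PySem.Set.mem_add, hq x]

-- the values recorded in the table are the current index or later, and strictly increase
lemma fold_snd_bound (pl : List (Int × String)) :
    ∀ (second : List (String × Int)) (seen : PySem.Set String),
    pl.Pairwise (fun p q => p.1 < q.1) →
    second.Pairwise (fun a b => a.2 < b.2) →
    (∀ kv ∈ second, ∀ p ∈ pl, kv.2 < p.1) →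
    (pl.foldl sorterAltStep (second, seen)).1.Pairwise (fun a b => a.2 < b.2) := by
  induction pl with
  | nil => intro second seen _ h2 _; simpa using h2
  | cons p t ih =>
    intro second seen hp h2 hb
    have hpt : ∀ q ∈ t, p.1 < q.1 := (List.pairwise_cons.mp hp).1
    have hpt' : t.Pairwise (fun p q => p.1 < q.1) := (List.pairwise_cons.mp hp).2
    simp only [List.foldl_cons, sorterAltStep]
    split_ifs with h1 h3 h4
    · exact ih second seen hpt' h2 (fun kv hkv q hq => hb kv hkv q (by simp [hq]))
    · exact ih second seen hpt' h2 (fun kv hkv q hq => hb kv hkv q (by simp [hq]))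
    · refine ih (second ++ [(p.2, p.1)]) seen hpt' ?_ ?_
      · rw [List.pairwise_append]
        refine ⟨h2, by simp, ?_⟩
        intro a ha b hb'
        simp only [List.mem_singleton] at hb'
        subst hb'
        exact hb a ha p (by simp)
      · intro kv hkv q hq
        rcases List.mem_append.mp hkv with h | h
        · exact hb kv h q (by simp [hq])
        · simp only [List.mem_singleton] at h
          subst h
          exact hpt q hq
    · exact ih second (PySem.Set.add seen p.2) hpt' h2
        (fun kv hkv q hq => hb kv hkv q (by simp [hq]))

-- Python's min keeps the first element when the recorded indices strictly increase
lemma min?_of_pairwise (xs : List (String × Int))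
    (h : xs.Pairwise (fun a b => a.2 < b.2)) :
    PySem.List.min? xs (fun kv => kv.2) = xs.head? := by
  cases xs with
  | nil => rfl
  | cons x t =>
    cases hmin : PySem.List.min? (x :: t) (fun kv : String × Int => kv.2) with
    | none =>
      rw [PySem.List.min?_eq_none_iff] at hmin
      exact absurd hmin (by simp)
    | some m =>
      have hmem := PySem.List.min?_mem hmin
      have hle := PySem.List.min?_isMin hmin x (by simp)
      rcases List.mem_cons.mp hmem with h1 | h1
      · simp [h1]
      · have := (List.pairwise_cons.mp h).1 m h1
        omega

-- ===== VERDICT (by name: the statement is the Claim_ definition above) =====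
theorem sorter_spec : Claim_equal_sorter := by
  intro l _
  unfold Spec_sorter sorter sorter_alt
  have hpair := fold_snd_bound (PySem.List.enumerate l 0) [] (PySem.Set.ofList [])
    (PySem.List.pairwise_lt_enumerate l 0) (by simp) (by simp)
  rw [min?_of_pairwise _ hpair]
  rw [go_eq_fold l 0 [] (PySem.Set.ofList []) (by intro m; simp [PySem.Set.ofList])]
  cases ((PySem.List.enumerate l 0).foldl sorterAltStep ([], PySem.Set.ofList [])).1.head? with
  | none => rfl
  | some kv => rfl
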